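-- pv_equiv track=rewrite | github.com/bertichelucas/Algo1---Ejercicios | TP4_Bazas/bazas.py | determinar_ganador_juego
-- ===== SOURCE A (Python) =====
-- def determinar_ganador_juego(estado_juego):
--     '''
--     Recibe el estado del juego con los puntajes finales de todos los jugadores y devuelve el gandor
--     del juego o si hubo un empate devuelve una lista con los mismos.
--     '''
--     diccionario_jugadores, _, _ = estado_juego
--     tabla_puntaje = []
--     tabla_empate = []
--     for jugador in diccionario_jugadores:
--         _, puntaje_total, _, _ = diccionario_jugadores[jugador]
--         tabla_puntaje.append((int(puntaje_total), jugador))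
--
--     tabla_puntaje = sorted(tabla_puntaje)[::-1]
--     tabla_empate.append(tabla_puntaje[0])
--
--     for puntaje in tabla_puntaje:
--         if puntaje[1] != tabla_empate[0][1]:
--             if puntaje[0] == tabla_empate[0][0]:
--                 tabla_empate.append(puntaje)
--     if len(tabla_empate) == 1:
--         return [tabla_puntaje[0]]
--     else:
--         return tabla_empate
-- ===== SOURCE B (Python) =====
-- def determinar_ganador_juego(estado_juego):
--     '''
--     Recibe el estado del juego con los puntajes finales de todos los jugadores y devuelve el
--     ganador del juego o, si hubo empate, la lista de empatados (orden descendente).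
--     '''
--     diccionario_jugadores, _, _ = estado_juego
--     puntajes = []
--     for jugador in diccionario_jugadores:
--         _, puntaje_total, _, _ = diccionario_jugadores[jugador]
--         puntajes.append((int(puntaje_total), jugador))
--
--     maximo = puntajes[0][0]
--     for puntaje, _ in puntajes[1:]:
--         if puntaje > maximo:
--             maximo = puntaje
--
--     ganadores = [p for p in puntajes if p[0] == maximo]
--     return sorted(ganadores, reverse=True)
-- ===== Notes on version B (the rewrite author's own statement) =====
-- stated objective: alternative
-- what changed: Replaces A's full sort of all (score,name) pairs followed by a duplicate-collecting scan with a single linear max-scan over the scores, a filter of the max-score pairs, and a descending sort of only that (usually tiny) tied subset.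
import Mathlib
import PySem

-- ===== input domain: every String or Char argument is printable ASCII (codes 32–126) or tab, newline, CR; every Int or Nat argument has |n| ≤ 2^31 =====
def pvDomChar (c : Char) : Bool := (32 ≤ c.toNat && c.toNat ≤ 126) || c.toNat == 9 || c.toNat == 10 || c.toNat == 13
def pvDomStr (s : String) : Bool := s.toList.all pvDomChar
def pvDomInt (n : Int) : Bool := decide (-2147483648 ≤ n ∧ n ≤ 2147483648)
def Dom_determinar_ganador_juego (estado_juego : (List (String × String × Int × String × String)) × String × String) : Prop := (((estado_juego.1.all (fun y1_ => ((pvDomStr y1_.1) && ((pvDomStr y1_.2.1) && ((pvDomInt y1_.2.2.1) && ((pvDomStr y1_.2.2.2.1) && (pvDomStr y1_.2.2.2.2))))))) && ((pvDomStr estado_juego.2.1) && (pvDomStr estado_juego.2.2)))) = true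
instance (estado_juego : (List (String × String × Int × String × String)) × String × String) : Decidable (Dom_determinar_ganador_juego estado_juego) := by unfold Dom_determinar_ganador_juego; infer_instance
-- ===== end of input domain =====

-- B replaces A's full sort of all (score,name) pairs + duplicate-collecting scan by a linear
-- max-scan, a filter of the max-score pairs and a descending sort of only that tied subset
-- (objective: alternative decomposition, same observable result).

-- ===== PORT A =====
def determinar_ganador_juego (estado_juego : (List (String × String × Int × String × String)) × String × String) : List (Int × String) :=
  let diccionario_jugadores := PySem.Dict.ofList estado_juego.1
  -- for jugador in diccionario_jugadores: tabla_puntaje.append((int(puntaje_total), jugador))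
  let tabla_puntaje := diccionario_jugadores.items.foldl
    (fun acc kv => acc ++ [((kv.2.2.1 : Int), kv.1)]) ([] : List (Int × String))
  -- tabla_puntaje = sorted(tabla_puntaje)[::-1]
  let tabla_puntaje :=
    ((PySem.List.slice? (PySem.List.sorted2 tabla_puntaje (fun p => p.1) (fun p => p.2) false) none none (-1)).getD [])
  -- tabla_empate.append(tabla_puntaje[0]): IndexError on an empty dict — excluded by Pre_
  match PySem.List.pyGet? tabla_puntaje 0 with
  | none => []
  | some top =>
    let tabla_empate := tabla_puntaje.foldl
      (fun acc puntaje =>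
        if puntaje.2 ≠ (PySem.List.pyGetD acc 0 (0, "")).2 then
          (if puntaje.1 = (PySem.List.pyGetD acc 0 (0, "")).1 then acc ++ [puntaje] else acc)
        else acc) [top]
    if tabla_empate.length = 1 then [top] else tabla_empate

-- ===== PORT B =====
def determinar_ganador_juego_alt (estado_juego : (List (String × String × Int × String × String)) × String × String) : List (Int × String) :=
  let diccionario_jugadores := PySem.Dict.ofList estado_juego.1
  let puntajes := diccionario_jugadores.items.foldl
    (fun acc kv => acc ++ [((kv.2.2.1 : Int), kv.1)]) ([] : List (Int × String))
  -- maximo = puntajes[0][0]: IndexError on an empty dict — excluded by Pre_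
  match PySem.List.pyGet? puntajes 0 with
  | none => []
  | some p0 =>
    let maximo := (PySem.List.slice puntajes (some 1) none).foldl
      (fun m q => if q.1 > m then q.1 else m) p0.1
    let ganadores := puntajes.filter (fun p => p.1 == maximo)
    PySem.List.sorted2 ganadores (fun p => p.1) (fun p => p.2) true

-- ===== PRECONDITION & SPEC =====
-- Pre_ excludes only the empty players dictionary, on which both A and B raise IndexError.
def Pre_determinar_ganador_juego (estado_juego : (List (String × String × Int × String × String)) × String × String) : Prop :=
  estado_juego.1 ≠ []
instance (estado_juego : (List (String × String × Int × String × String)) × String × String) : Decidable (Pre_determinar_ganador_juego estado_juego) := by unfold Pre_determinar_ganador_juego; infer_instance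

def pvWitness_determinar_ganador_juego : ((List (String × String × Int × String × String)) × String × String) :=
  ([("Ana", ("x", 7, "y", "z")), ("Bob", ("x", 7, "y", "z")), ("Cal", ("x", 3, "y", "z"))], "ronda", "mazo")

def Spec_determinar_ganador_juego (estado_juego : (List (String × String × Int × String × String)) × String × String) (out : List (Int × String)) : Prop := out = determinar_ganador_juego_alt estado_juego
instance (estado_juego : (List (String × String × Int × String × String)) × String × String) (out : List (Int × String)) : Decidable (Spec_determinar_ganador_juego estado_juego out) := by unfold Spec_determinar_ganador_juego; infer_instance

-- ===== CLAIM (what is proved, stated in full; the proofs are below) =====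
def Claim_equal_determinar_ganador_juego : Prop := ∀ (estado_juego : (List (String × String × Int × String × String)) × String × String), Dom_determinar_ganador_juego estado_juego → Pre_determinar_ganador_juego estado_juego → Spec_determinar_ganador_juego estado_juego (determinar_ganador_juego estado_juego)

-- ===== LEMMAS AND PROOFS =====

-- Python's sort of pairs is the lexicographic sort.
theorem pv_sorted2_eq_sorted_toLex {α κ₁ κ₂ : Type} [LinearOrder κ₁] [LinearOrder κ₂]
    (xs : List α) (k1 : α → κ₁) (k2 : α → κ₂) (rev : Bool) :
    PySem.List.sorted2 xs k1 k2 rev = PySem.List.sorted xs (fun x => toLex (k1 x, k2 x)) rev := by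
  have key : ∀ a b : α,
      (decide (k1 a < k1 b) || (!decide (k1 b < k1 a) && decide (k2 a < k2 b)))
        = decide (toLex (k1 a, k2 a) < toLex (k1 b, k2 b)) := by
    intro a b
    apply Bool.eq_iff_iff.mpr
    simp only [Bool.or_eq_true, Bool.and_eq_true, Bool.not_eq_true', decide_eq_true_eq,
      decide_eq_false_iff_not, Prod.Lex.lt_iff, ofLex_toLex]
    constructor
    · rintro (h | ⟨h1, h2⟩)
      · exact Or.inl h
      · rcases (not_lt.mp h1).lt_or_eq with h' | h'
        · exact Or.inl h'
        · exact Or.inr ⟨h', h2⟩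
    · rintro (h | ⟨h1, h2⟩)
      · exact Or.inl h
      · exact Or.inr ⟨by simp [h1], h2⟩
  unfold PySem.List.sorted2 PySem.List.sorted
  cases rev <;> simp only [if_pos, Bool.false_eq_true, reduceIte, key]

-- the append-loop builds the mapped list
theorem pv_build_pairs {α β : Type} (l : List α) (f : α → β) :
    l.foldl (fun acc x => acc ++ [f x]) [] = l.map f := by
  rw [PySem.List.foldl_append_eq_flatMap (fun x => [f x]) l []]
  induction l with
  | nil => simp
  | cons x t ih => simp_all

-- A's tie-collecting loop is a filter against the fixed head
theorem pv_empate_loop (l : List (Int × String)) (top : Int × String) (rest : List (Int × String)) :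
    l.foldl (fun acc (puntaje : Int × String) =>
        if puntaje.2 ≠ (PySem.List.pyGetD acc 0 (0, "")).2 then
          (if puntaje.1 = (PySem.List.pyGetD acc 0 (0, "")).1 then acc ++ [puntaje] else acc)
        else acc) (top :: rest)
      = top :: (rest ++ l.filter (fun p => p.2 ≠ top.2 ∧ p.1 = top.1)) := by
  induction l generalizing rest with
  | nil => simp
  | cons p l ih =>
    have hget : PySem.List.pyGetD (top :: rest) 0 (0, "") = top := by
      simp [PySem.List.pyGetD, PySem.List.pyGet?, PySem.List.pyIdx?]
    simp only [List.foldl_cons, hget]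
    by_cases h2 : p.2 = top.2
    · rw [if_neg (fun h => h h2), ih rest]
      simp [h2]
    · by_cases h1 : p.1 = top.1
      · rw [if_pos h2, if_pos h1, List.cons_append, ih (rest ++ [p])]
        simp [h2, h1]
      · rw [if_pos h2, if_neg h1, ih rest]
        simp [h2, h1]

-- the core equivalence over an arbitrary nonempty pair list with distinct names
theorem pv_core (ps : List (Int × String)) (hne : ps ≠ []) (hnd : (ps.map Prod.snd).Nodup) :
    (match PySem.List.pyGet? ((PySem.List.slice? (PySem.List.sorted2 ps (fun p => p.1) (fun p => p.2) false) none none (-1)).getD []) 0 with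
     | none => []
     | some top =>
       let tabla_empate := ((PySem.List.slice? (PySem.List.sorted2 ps (fun p => p.1) (fun p => p.2) false) none none (-1)).getD []).foldl
         (fun acc (puntaje : Int × String) =>
           if puntaje.2 ≠ (PySem.List.pyGetD acc 0 (0, "")).2 then
             (if puntaje.1 = (PySem.List.pyGetD acc 0 (0, "")).1 then acc ++ [puntaje] else acc)
           else acc) [top]
       if tabla_empate.length = 1 then [top] else tabla_empate)
    = (match PySem.List.pyGet? ps 0 with
       | none => []
       | some p0 =>
         let maximo := (PySem.List.slice ps (some 1) none).foldl
           (fun m (q : Int × String) => if q.1 > m then q.1 else m) p0.1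
         PySem.List.sorted2 (ps.filter (fun p => p.1 == maximo)) (fun p => p.1) (fun p => p.2) true) := by
  -- pairwise-distinct names
  have hpair : List.Pairwise (fun a b : Int × String => a.2 ≠ b.2) ps := by
    have h := hnd
    rw [List.Nodup, List.pairwise_map] at h
    exact h
  have hkeyne : ∀ a b : Int × String, a.2 ≠ b.2 → toLex (a.1, a.2) ≠ toLex (b.1, b.2) := by
    intro a b h hc
    exact h (by simpa using congrArg (fun x => (ofLex x).2) hc)
  -- the descending lexicographic sort of ps
  have hSperm : (PySem.List.sorted ps (fun p : Int × String => toLex (p.1, p.2)) true).Perm ps :=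
    PySem.List.sorted_perm ps _ true
  have hSne : List.Pairwise (fun a b : Int × String => a.2 ≠ b.2)
      (PySem.List.sorted ps (fun p : Int × String => toLex (p.1, p.2)) true) :=
    ((hSperm.pairwise_iff (fun h => h.symm)).mpr) hpair
  have hSgt : List.Pairwise (fun a b : Int × String => toLex (b.1, b.2) < toLex (a.1, a.2))
      (PySem.List.sorted ps (fun p : Int × String => toLex (p.1, p.2)) true) :=
    ((PySem.List.sorted_pairwise_rev ps _).and hSne).imp
      (fun h => lt_of_le_of_ne h.1 (hkeyne _ _ (Ne.symm h.2)))
  -- A's sorted(...)[::-1] is that descending sort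
  have hrev : (PySem.List.sorted ps (fun p : Int × String => toLex (p.1, p.2)) false).reverse
      = PySem.List.sorted ps (fun p : Int × String => toLex (p.1, p.2)) true := by
    have hne' : List.Pairwise (fun a b : Int × String => a.2 ≠ b.2)
        (PySem.List.sorted ps (fun p : Int × String => toLex (p.1, p.2)) false) :=
      (((PySem.List.sorted_perm ps _ false).pairwise_iff (fun h => h.symm)).mpr) hpair
    refine (PySem.List.sorted_rev_eq_of_perm_of_pairwise_gt ps _ _ ?_ ?_).symm
    · exact (List.reverse_perm _).trans (PySem.List.sorted_perm ps _ false)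
    · rw [List.pairwise_reverse]
      exact ((PySem.List.sorted_pairwise ps _).and hne').imp
        (fun h => lt_of_le_of_ne h.1 (hkeyne _ _ h.2))
  have htabla : ((PySem.List.slice? (PySem.List.sorted2 ps (fun p => p.1) (fun p => p.2) false) none none (-1)).getD [])
      = PySem.List.sorted ps (fun p : Int × String => toLex (p.1, p.2)) true := by
    rw [pv_sorted2_eq_sorted_toLex, PySem.List.slice?_none_none_neg_one]
    simpa using hrev
  rw [htabla]
  -- both sides are nonempty
  obtain ⟨p0, t, hps⟩ : ∃ p0 t, ps = p0 :: t := by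
    cases ps with
    | nil => exact absurd rfl hne
    | cons a l => exact ⟨a, l, rfl⟩
  obtain ⟨top, T, hScons⟩ : ∃ top T,
      PySem.List.sorted ps (fun p : Int × String => toLex (p.1, p.2)) true = top :: T := by
    cases hSeq : PySem.List.sorted ps (fun p : Int × String => toLex (p.1, p.2)) true with
    | nil => exact absurd ((PySem.List.sorted_eq_nil_iff ps _ true).mp hSeq) hne
    | cons a l => exact ⟨a, l, rfl⟩
  -- B's running maximum equals the score of the sorted head
  have htopmem : top ∈ ps := hSperm.subset (hScons ▸ List.mem_cons_self)
  have htopmax : ∀ y ∈ ps, y.1 ≤ top.1 := by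
    intro y hy
    have h := PySem.List.key_head_sorted_rev_ge ps (fun p : Int × String => toLex (p.1, p.2)) hScons y hy
    rcases Prod.Lex.le_iff.mp h with h' | h'
    · exact le_of_lt (by simpa using h')
    · simp only [ofLex_toLex] at h'
      exact le_of_eq h'.1
  have hfoldmax : t.foldl (fun m (q : Int × String) => if q.1 > m then q.1 else m) p0.1 = top.1 := by
    have hfn : (fun m (q : Int × String) => if q.1 > m then q.1 else m)
        = (fun m q => max m q.1) := by
      funext m q
      by_cases h : q.1 > m
      · simp [h, max_eq_right h.le]
      · simp [h, max_eq_left (not_lt.mp h)]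
    rw [hfn]
    have hle := PySem.List.le_foldl_max_int t (fun q : Int × String => q.1) p0.1
    have hmem : t.foldl (fun m (q : Int × String) => max m q.1) p0.1 = p0.1 ∨
        t.foldl (fun m (q : Int × String) => max m q.1) p0.1 ∈ t.map (fun q : Int × String => q.1) := by
      rw [← List.foldl_map (f := fun q : Int × String => q.1) (g := max)]
      exact PySem.List.foldl_max_mem _ _
    apply le_antisymm
    · rcases hmem with h | h
      · rw [h]; exact htopmax p0 (by rw [hps]; exact List.mem_cons_self)
      · obtain ⟨q, hq, hq'⟩ := List.mem_map.mp h
        rw [← hq']; exact htopmax q (by rw [hps]; exact List.mem_cons_of_mem _ hq)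
    · rcases List.mem_cons.mp (show top ∈ p0 :: t from hps ▸ htopmem) with h | h
      · rw [h]; exact hle.1
      · exact hle.2 _ h
  -- B's final sort is the filter of the descending sort
  have hBsort : PySem.List.sorted2 (ps.filter (fun p => p.1 == top.1)) (fun p => p.1) (fun p => p.2) true
      = (top :: T).filter (fun p => p.1 == top.1) := by
    rw [pv_sorted2_eq_sorted_toLex]
    apply PySem.List.sorted_rev_eq_of_perm_of_pairwise_gt
    · exact hScons ▸ hSperm.filter _
    · exact List.Pairwise.sublist List.filter_sublist (hScons ▸ hSgt)
  -- now reduce both sides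
  have hget1 : PySem.List.pyGet? (top :: T) 0 = some top := by
    simp [PySem.List.pyGet?, PySem.List.pyIdx?]
  have hget2 : PySem.List.pyGet? (p0 :: t) 0 = some p0 := by
    simp [PySem.List.pyGet?, PySem.List.pyIdx?]
  conv_lhs => rw [hScons, hget1]
  conv_rhs => rw [hps, hget2]
  rw [PySem.List.slice_from_one, List.tail_cons]
  dsimp only
  rw [pv_empate_loop (top :: T) top [], List.nil_append]
  rw [← hps, hfoldmax, hBsort]
  have hTne : ∀ x ∈ T, x.2 ≠ top.2 := by
    intro x hx
    exact ((List.pairwise_cons.mp (hScons ▸ hSne)).1 x hx).symm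
  have hfilters : T.filter (fun p => decide (p.2 ≠ top.2 ∧ p.1 = top.1))
      = T.filter (fun p => p.1 == top.1) := by
    apply List.filter_congr
    intro x hx
    simp only [hTne x hx, ne_eq, not_false_eq_true, true_and]
    apply Bool.eq_iff_iff.mpr
    simp
  rw [List.filter_cons, List.filter_cons]
  simp only [ne_eq, not_true_eq_false, false_and, decide_false, Bool.false_eq_true, if_false,
    beq_self_eq_true, if_true, hfilters]
  cases hT : T.filter (fun p => p.1 == top.1) with
  | nil => simp
  | cons a l => simp

-- ===== VERDICT (by name: the statement is the Claim_ definition above) =====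
theorem determinar_ganador_juego_spec : Claim_equal_determinar_ganador_juego := by
  intro e _ hpre
  unfold Spec_determinar_ganador_juego determinar_ganador_juego determinar_ganador_juego_alt
  simp only [pv_build_pairs]
  have hkeys : ∀ k, k ∈ (PySem.Dict.ofList e.1).keys ↔ k ∈ e.1.map Prod.fst := by
    intro k
    have h : (PySem.Dict.ofList e.1).keys
        = PySem.Set.update PySem.Dict.empty.keys (e.1.map Prod.fst) :=
      PySem.Dict.keys_foldl_insert_key e.1 Prod.fst (fun _ p => p.2) PySem.Dict.empty
    rw [h, PySem.Dict.keys_empty]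
    exact PySem.Set.mem_ofList (e.1.map Prod.fst) k
  have hitems_ne : (PySem.Dict.ofList e.1).items ≠ [] := by
    intro hnil
    cases he : e.1 with
    | nil => exact hpre he
    | cons kv l =>
      have : kv.1 ∈ (PySem.Dict.ofList e.1).keys := by
        rw [hkeys, he]; exact List.mem_map_of_mem List.mem_cons_self
      rw [PySem.Dict.keys, hnil] at this
      simp at this
  apply pv_core
  · intro h
    exact hitems_ne (List.map_eq_nil_iff.mp h)
  · have h : ((PySem.Dict.ofList e.1).items.map
        (fun kv : String × String × Int × String × String => ((kv.2.2.1 : Int), kv.1))).map Prod.snd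
        = (PySem.Dict.ofList e.1).keys := by
      rw [List.map_map]; rfl
    rw [h]
    exact PySem.Dict.nodup_keys_ofList e.1
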